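-- pv_equiv track=rewrite | github.com/masebs/adventOfCode2021 | day22-inclusionExclusionAttempt.py | findIntersects
-- ===== SOURCE A (Python) =====
-- def overlapCoord(list1, list2):
--     fromval = max((list1[0], list2[0]))
--     toval   = min((list1[-1], list2[-1]))
--     if fromval < toval:
--         return [fromval, toval]
--     else:
--         return []
--
-- def overlapCube(cube1, cube2):
--     if cube1 == [] or cube2 == []:
--         return []
--     else:
--         overlaps = []
--         for k in range(3):
--             o = overlapCoord(cube1[k], cube2[k])
--             if not o: # if (at least) one coord does not overlap, the cube does not overlap
--                 return []
--             overlaps.append(o)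
--         return overlaps
--
-- def findIntersects(cubes):
--     intersects = {}
--     for k in range(len(cubes)):
--         intersects[k] = []
--
--     for i, cube1 in enumerate(cubes):
--         for j, cube2 in enumerate(cubes):
--             if i == j:
--                 continue
--             if overlapCube(cube1, cube2):
--                 intersects[i].append(j)
--     return intersects
-- ===== SOURCE B (Python) =====
-- def axisOverlap(c1, c2, k):
--     # boolean per-axis test: the two coordinate ranges on axis k overlap strictly
--     return max(c1[k][0], c2[k][0]) < min(c1[k][-1], c2[k][-1])
--
-- def findIntersects(cubes):
--     # staged pipeline: generate candidate ordered pairs once, then filter them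
--     # by one axis per pass, then group the survivors into the adjacency dict
--     n = len(cubes)
--     pairs = [(i, j) for i in range(n) for j in range(n)
--              if i != j and cubes[i] != [] and cubes[j] != []]
--     for k in range(3):
--         pairs = [(i, j) for (i, j) in pairs if axisOverlap(cubes[i], cubes[j], k)]
--     result = {k: [] for k in range(n)}
--     for (i, j) in pairs:
--         result[i].append(j)
--     return result
-- ===== Notes on version B (the rewrite author's own statement) =====
-- stated objective: alternative
-- what changed: A mutates the dict while nested loops run a per-pair early-exit cube test built from list-returning helpers; B is a staged pipeline: it materialises the candidate ordered-pair list once, then runs three successive filter passes (one boolean per-axis predicate per pass, no overlapCoord/overlapCube list building), and finally groups the surviving pairs into the dict.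
import Mathlib
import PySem

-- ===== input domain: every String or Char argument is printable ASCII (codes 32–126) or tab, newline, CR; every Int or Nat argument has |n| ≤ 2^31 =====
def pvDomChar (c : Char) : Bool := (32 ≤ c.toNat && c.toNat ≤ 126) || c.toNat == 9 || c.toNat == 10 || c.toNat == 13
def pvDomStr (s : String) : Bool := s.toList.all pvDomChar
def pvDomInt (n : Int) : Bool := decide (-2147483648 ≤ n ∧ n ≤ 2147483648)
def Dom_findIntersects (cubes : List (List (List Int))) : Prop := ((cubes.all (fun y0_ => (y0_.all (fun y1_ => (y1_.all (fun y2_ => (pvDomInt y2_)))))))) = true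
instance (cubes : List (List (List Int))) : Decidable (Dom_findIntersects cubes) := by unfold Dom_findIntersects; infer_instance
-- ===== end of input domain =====

-- B replaces A's dict-mutating nested scan (per-pair early-exit cube test built from
-- list-returning helpers) by a staged pipeline: materialise the candidate ordered pairs
-- once, filter them by one boolean per-axis predicate per pass, then group into the dict.

-- ===== PORT A =====
def pvOvCoord (l1 l2 : List Int) : List Int :=
  let fromval := max (PySem.List.pyGetD l1 0 0) (PySem.List.pyGetD l2 0 0)
  let toval := min (PySem.List.pyGetD l1 (-1) 0) (PySem.List.pyGetD l2 (-1) 0)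
  if fromval < toval then [fromval, toval] else []

-- the 'for k in range(3)' loop of overlapCube, with its early 'return []'
def pvOvLoop (c1 c2 : List (List Int)) : List Int → List (List Int) → List (List Int)
  | [], acc => acc
  | k :: ks, acc =>
    let o := pvOvCoord (PySem.List.pyGetD c1 k []) (PySem.List.pyGetD c2 k [])
    if o = [] then [] else pvOvLoop c1 c2 ks (acc ++ [o])

def pvOvCube (c1 c2 : List (List Int)) : List (List Int) :=
  if c1 = [] ∨ c2 = [] then [] else pvOvLoop c1 c2 (PySem.List.pyRange 0 3 1) []

def findIntersects (cubes : List (List (List Int))) : List (Int × List Int) :=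
  let d0 : PySem.Dict Int (List Int) :=
    (PySem.List.pyRange 0 (cubes.length : Int) 1).foldl (fun d k => d.insert k []) PySem.Dict.empty
  let d :=
    (PySem.List.enumerate cubes).foldl (fun d ic =>
      (PySem.List.enumerate cubes).foldl (fun d jc =>
        if ic.1 = jc.1 then d
        else if pvOvCube ic.2 jc.2 ≠ [] then d.modify ic.1 [] (· ++ [jc.1]) else d) d) d0
  d.items

-- ===== PORT B =====
-- axisOverlap of Source B: boolean per-axis overlap predicate
def pvAxisOv (c1 c2 : List (List Int)) (k : Int) : Bool :=
  decide (max (PySem.List.pyGetD (PySem.List.pyGetD c1 k []) 0 0)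
              (PySem.List.pyGetD (PySem.List.pyGetD c2 k []) 0 0)
        < min (PySem.List.pyGetD (PySem.List.pyGetD c1 k []) (-1) 0)
              (PySem.List.pyGetD (PySem.List.pyGetD c2 k []) (-1) 0))

def findIntersects_alt (cubes : List (List (List Int))) : List (Int × List Int) :=
  let n : Int := (cubes.length : Int)
  -- candidate ordered pairs (nested comprehension of Source B)
  let pairs0 : List (Int × Int) :=
    (PySem.List.pyRange 0 n 1).flatMap (fun i =>
      (PySem.List.pyRange 0 n 1).filterMap (fun j =>
        if i ≠ j ∧ PySem.List.pyGetD cubes i [] ≠ [] ∧ PySem.List.pyGetD cubes j [] ≠ []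
        then some (i, j) else none))
  -- three filter passes, one per axis
  let pairs :=
    (PySem.List.pyRange 0 3 1).foldl
      (fun ps k => ps.filter (fun p =>
        pvAxisOv (PySem.List.pyGetD cubes p.1 []) (PySem.List.pyGetD cubes p.2 []) k)) pairs0
  -- grouping pass
  let d0 : PySem.Dict Int (List Int) :=
    (PySem.List.pyRange 0 n 1).foldl (fun d k => d.insert k []) PySem.Dict.empty
  let d := pairs.foldl (fun d p => d.modify p.1 [] (· ++ [p.2])) d0
  d.items

-- ===== PRECONDITION & SPEC =====
-- does the coordinate range pair overlap (the 'fromval < toval' test of overlapCoord)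
def pvCoordOv (l1 l2 : List Int) : Prop :=
  max (l1.getD 0 0) (l2.getD 0 0) < min ((l1.getLast?).getD 0) ((l2.getLast?).getD 0)

-- the indexing of overlapCube(c1, c2) stays in range: it reads coordinate k+1 only after
-- coordinate k overlapped, so later coordinates need only exist if the earlier ones overlap
def pvPairSafe (c1 c2 : List (List Int)) : Prop :=
  c1 = [] ∨ c2 = [] ∨
  (c1.getD 0 [] ≠ [] ∧ c2.getD 0 [] ≠ [] ∧
    (pvCoordOv (c1.getD 0 []) (c2.getD 0 []) →
      2 ≤ c1.length ∧ 2 ≤ c2.length ∧ c1.getD 1 [] ≠ [] ∧ c2.getD 1 [] ≠ [] ∧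
      (pvCoordOv (c1.getD 1 []) (c2.getD 1 []) →
        3 ≤ c1.length ∧ 3 ≤ c2.length ∧ c1.getD 2 [] ≠ [] ∧ c2.getD 2 [] ≠ [])))

-- Pre_ holds exactly when the Python A returns: A raises IndexError precisely when some pair of
-- distinct cubes makes overlapCube index past a cube's coordinate list or into an empty range.
def Pre_findIntersects (cubes : List (List (List Int))) : Prop :=
  ∀ i ∈ List.range cubes.length, ∀ j ∈ List.range cubes.length,
    i ≠ j → pvPairSafe (cubes.getD i []) (cubes.getD j [])
instance (cubes : List (List (List Int))) : Decidable (Pre_findIntersects cubes) := by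
  unfold Pre_findIntersects pvPairSafe pvCoordOv; infer_instance

def pvWitness_findIntersects : List (List (List Int)) :=
  [[[0, 2], [0, 2], [0, 2]], [[1, 3], [1, 3], [1, 3]], []]

def Spec_findIntersects (cubes : List (List (List Int))) (out : List (Int × List Int)) : Prop := out = findIntersects_alt cubes
instance (cubes : List (List (List Int))) (out : List (Int × List Int)) : Decidable (Spec_findIntersects cubes out) := by unfold Spec_findIntersects; infer_instance

-- ===== CLAIM (what is proved, stated in full; the proofs are below) =====
def Claim_equal_findIntersects : Prop := ∀ (cubes : List (List (List Int))), Dom_findIntersects cubes → Pre_findIntersects cubes → Spec_findIntersects cubes (findIntersects cubes)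

-- ===== LEMMAS AND PROOFS =====

-- cube i of the input, as both ports see it through pyGetD
def pvCi (cubes : List (List (List Int))) (i : Nat) : List (List Int) := cubes.getD i []

-- Bool: does cube i overlap cube j (in A's orientation) and i ≠ j
def pvAdj (cubes : List (List (List Int))) (i j : Nat) : Bool :=
  !decide (i = j) && decide (pvOvCube (pvCi cubes i) (pvCi cubes j) ≠ [])

-- adjacency list of i restricted to indices < m, in increasing order
def pvRowTo (cubes : List (List (List Int))) (i m : Nat) : List Int :=
  ((List.range m).filter (pvAdj cubes i)).map Int.ofNat

-- the common value of both ports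
def pvSpecOut (cubes : List (List (List Int))) : List (Int × List Int) :=
  (List.range cubes.length).map (fun (k : Nat) => ((k : Int), pvRowTo cubes k cubes.length))

theorem pvRowTo_succ (cubes : List (List (List Int))) (i m : Nat) :
    pvRowTo cubes i (m + 1) =
      pvRowTo cubes i m ++ (if pvAdj cubes i m then [(m : Int)] else []) := by
  simp only [pvRowTo, List.range_succ, List.filter_append]
  split <;> simp_all

def pvMkMap (ks : List Nat) (g : Nat → List Int) : PySem.Dict Int (List Int) :=
  ⟨ks.map (fun (k : Nat) => ((k : Int), g k))⟩

theorem pvContains_of_mem (ks : List Nat) (g : Nat → List Int) (i : Nat) (h : i ∈ ks) :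
    (pvMkMap ks g).contains (i : Int) = true := by
  simp only [pvMkMap, PySem.Dict.contains, List.any_eq_true]
  exact ⟨((i : Int), g i), List.mem_map.mpr ⟨i, h, rfl⟩, by simp⟩

theorem pvContains_of_not_mem (ks : List Nat) (g : Nat → List Int) (i : Nat) (h : i ∉ ks) :
    (pvMkMap ks g).contains (i : Int) = false := by
  simp only [pvMkMap, PySem.Dict.contains, List.any_eq_false]
  rintro ⟨a, b⟩ hab
  rcases List.mem_map.mp hab with ⟨k, hk, hEq⟩
  have h1 : (k : Int) = a := congrArg Prod.fst hEq
  simp only [beq_iff_eq]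
  intro hcon
  apply h
  have : k = i := Nat.cast_inj.mp (h1.trans hcon)
  exact this ▸ hk

theorem pvGetD_mkMap (ks : List Nat) (g : Nat → List Int) (i : Nat) (h : i ∈ ks) :
    (pvMkMap ks g).getD (i : Int) [] = g i := by
  induction ks with
  | nil => cases h
  | cons k ks ih =>
    by_cases hk : k = i
    · subst hk
      simp [pvMkMap, PySem.Dict.getD, PySem.Dict.get?]
    · have hi : i ∈ ks := by
        rcases List.mem_cons.mp h with h' | h'
        · exact absurd h'.symm hk
        · exact h'
      have hne : ¬ ((k : Int) = (i : Int)) := fun hc => hk (Nat.cast_inj.mp hc)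
      simpa [pvMkMap, PySem.Dict.getD, PySem.Dict.get?, hne] using ih hi

theorem pvInsert_of_mem (ks : List Nat) (g : Nat → List Int) (i : Nat) (v : List Int)
    (h : i ∈ ks) :
    (pvMkMap ks g).insert (i : Int) v = pvMkMap ks (fun k => if k = i then v else g k) := by
  simp only [PySem.Dict.insert, pvContains_of_mem ks g i h, if_true]
  simp only [pvMkMap, List.map_map]
  congr 1
  refine List.map_congr_left (fun k _ => ?_)
  by_cases hk : k = i
  · subst hk; simp
  · have hne : ¬ ((k : Int) = (i : Int)) := fun hc => hk (Nat.cast_inj.mp hc)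
    simp [hk, hne, Function.comp]

theorem pvModify_mkMap (ks : List Nat) (g : Nat → List Int) (i : Nat) (f : List Int → List Int)
    (h : i ∈ ks) :
    (pvMkMap ks g).modify (i : Int) [] f = pvMkMap ks (fun k => if k = i then f (g i) else g k) := by
  rw [PySem.Dict.modify, pvGetD_mkMap ks g i h, pvInsert_of_mem ks g i (f (g i)) h]

theorem pvInsert_of_not_mem (n : Nat) (g : Nat → List Int) (v : List Int) :
    (pvMkMap (List.range n) g).insert (n : Int) v
      = pvMkMap (List.range (n + 1)) (fun k => if k = n then v else g k) := by
  have hnm : n ∉ List.range n := by simp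
  simp only [PySem.Dict.insert, pvContains_of_not_mem (List.range n) g n hnm,
    Bool.false_eq_true, if_false]
  simp only [pvMkMap, List.range_succ, List.map_append]
  congr 2
  · refine List.map_congr_left (fun k hk => ?_)
    have : k ≠ n := Nat.ne_of_lt (List.mem_range.mp hk)
    simp [this]
  · simp

theorem pvAInit (m : Nat) :
    (PySem.List.pyRange 0 (m : Int) 1).foldl (fun d k => d.insert k []) PySem.Dict.empty
      = pvMkMap (List.range m) (fun _ => []) := by
  induction m with
  | zero =>
    rw [Nat.cast_zero, PySem.List.pyRange_one_eq_nil le_rfl]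
    rfl
  | succ m ih =>
    have hc : ((m + 1 : Nat) : Int) = (m : Int) + 1 := by push_cast; ring
    rw [hc, PySem.List.pyRange_one_succ_right (Int.natCast_nonneg m), List.foldl_append,
      List.foldl_cons, List.foldl_nil, ih, pvInsert_of_not_mem]
    exact congrArg _ (funext fun k => by simp)

theorem pvAInner (cubes : List (List (List Int))) (i : Nat) (hi : i < cubes.length)
    (g : Nat → List Int) :
    ∀ (m : Nat), m ≤ cubes.length →
      (PySem.List.pyRange 0 (m : Int) 1).foldl
        (fun d j => if (i : Int) = j then d
          else if pvOvCube (PySem.List.pyGetD cubes (i : Int) []) (PySem.List.pyGetD cubes j []) ≠ []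
            then d.modify (i : Int) [] (· ++ [j]) else d)
        (pvMkMap (List.range cubes.length) g)
      = pvMkMap (List.range cubes.length)
          (fun k => if k = i then g k ++ pvRowTo cubes i m else g k) := by
  intro m
  induction m with
  | zero =>
    intro _
    rw [Nat.cast_zero, PySem.List.pyRange_one_eq_nil le_rfl, List.foldl_nil]
    refine congrArg _ (funext fun k => ?_)
    by_cases hk : k = i <;> simp [hk, pvRowTo]
  | succ m ih =>
    intro hm
    have hm' : m ≤ cubes.length := Nat.le_of_succ_le hm
    have hc : ((m + 1 : Nat) : Int) = (m : Int) + 1 := by push_cast; ring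
    rw [hc, PySem.List.pyRange_one_succ_right (Int.natCast_nonneg m), List.foldl_append,
      List.foldl_cons, List.foldl_nil, ih hm']
    by_cases him : i = m
    · have hcast : (i : Int) = (m : Int) := by exact_mod_cast him
      rw [if_pos hcast]
      refine congrArg _ (funext fun k => ?_)
      by_cases hk : k = i
      · have : pvAdj cubes i m = false := by simp [pvAdj, him]
        simp [hk, pvRowTo_succ, this]
      · simp [hk]
    · rw [if_neg (fun hc' => him (Nat.cast_inj.mp hc'))]
      have hget : PySem.List.pyGetD cubes ((m : Int)) [] = pvCi cubes m := by
        simp [PySem.List.pyGetD_natCast, pvCi]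
      have hgeti : PySem.List.pyGetD cubes ((i : Int)) [] = pvCi cubes i := by
        simp [PySem.List.pyGetD_natCast, pvCi]
      rw [hget, hgeti]
      by_cases hov : pvOvCube (pvCi cubes i) (pvCi cubes m) ≠ []
      · rw [if_pos hov, pvModify_mkMap _ _ i _ (List.mem_range.mpr hi)]
        refine congrArg _ (funext fun k => ?_)
        have hAdj : pvAdj cubes i m = true := by simp [pvAdj, him, hov]
        by_cases hk : k = i
        · simp [hk, pvRowTo_succ, hAdj]
        · simp [hk]
      · rw [if_neg hov]
        refine congrArg _ (funext fun k => ?_)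
        have hAdj : pvAdj cubes i m = false := by
          simp only [ne_eq, not_not] at hov
          simp [pvAdj, hov]
        by_cases hk : k = i
        · simp [hk, pvRowTo_succ, hAdj]
        · simp [hk]

theorem pvAOuter (cubes : List (List (List Int))) :
    ∀ (m : Nat), m ≤ cubes.length →
      (PySem.List.pyRange 0 (m : Int) 1).foldl
        (fun d (j : Int) =>
          (PySem.List.pyRange 0 (cubes.length : Int) 1).foldl
            (fun d j2 => if j = j2 then d
              else if pvOvCube (PySem.List.pyGetD cubes j []) (PySem.List.pyGetD cubes j2 []) ≠ []
                then d.modify j [] (· ++ [j2]) else d) d)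
        (pvMkMap (List.range cubes.length) (fun _ => []))
      = pvMkMap (List.range cubes.length)
          (fun k => if k < m then pvRowTo cubes k cubes.length else []) := by
  intro m
  induction m with
  | zero =>
    intro _
    rw [Nat.cast_zero, PySem.List.pyRange_one_eq_nil le_rfl, List.foldl_nil]
    exact congrArg _ (funext fun k => by simp)
  | succ m ih =>
    intro hm
    have hm' : m ≤ cubes.length := Nat.le_of_succ_le hm
    have hmlt : m < cubes.length := hm
    have hc : ((m + 1 : Nat) : Int) = (m : Int) + 1 := by push_cast; ring
    rw [hc, PySem.List.pyRange_one_succ_right (Int.natCast_nonneg m), List.foldl_append,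
      List.foldl_cons, List.foldl_nil, ih hm',
      pvAInner cubes m hmlt _ cubes.length le_rfl]
    refine congrArg _ (funext fun k => ?_)
    by_cases hk : k = m
    · simp [hk]
    · have : (k < m + 1) ↔ (k < m) := by omega
      simp [hk, this]

theorem pvA_eq (cubes : List (List (List Int))) : findIntersects cubes = pvSpecOut cubes := by
  simp only [findIntersects, PySem.List.enumerate_eq_map_pyRange cubes ([] : List (List Int)),
    List.foldl_map, PySem.List.len_eq]
  rw [pvAInit, pvAOuter cubes cubes.length le_rfl]
  simp only [pvMkMap, pvSpecOut]
  refine List.map_congr_left (fun k hk => ?_)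
  simp [List.mem_range.mp hk]

-- ===== B-side lemmas =====

-- pvOvCube's early-exit loop succeeds exactly when the three boolean axis predicates hold
theorem pvOvCube_ne_nil (c1 c2 : List (List Int)) :
    (pvOvCube c1 c2 ≠ []) ↔
      (c1 ≠ [] ∧ c2 ≠ [] ∧ pvAxisOv c1 c2 0 = true ∧ pvAxisOv c1 c2 1 = true ∧
        pvAxisOv c1 c2 2 = true) := by
  have hr : PySem.List.pyRange 0 3 1 = [0, 1, 2] := by decide
  rcases eq_or_ne c1 [] with h1 | h1
  · simp [pvOvCube, h1]
  rcases eq_or_ne c2 [] with h2 | h2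
  · simp [pvOvCube, h2]
  simp only [pvOvCube, hr, if_neg (by simp [h1, h2] : ¬ (c1 = [] ∨ c2 = [])),
    pvOvLoop, pvOvCoord, pvAxisOv]
  split_ifs <;> simp_all

-- folding the per-pair row-append over a list of pairs that all target row i
theorem pvFoldRow (cubes : List (List (List Int))) (i : Nat) (hi : i < cubes.length)
    (js : List Int) (g : Nat → List Int) :
    (js.map (fun j => ((i : Int), j))).foldl
        (fun (d : PySem.Dict Int (List Int)) p => d.modify p.1 [] (· ++ [p.2]))
        (pvMkMap (List.range cubes.length) g)
      = pvMkMap (List.range cubes.length) (fun k => if k = i then g i ++ js else g k) := by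
  induction js generalizing g with
  | nil =>
    simp only [List.map_nil, List.foldl_nil]
    refine congrArg _ (funext fun k => ?_)
    by_cases hk : k = i <;> simp [hk]
  | cons j js ih =>
    simp only [List.map_cons, List.foldl_cons]
    rw [pvModify_mkMap _ _ i _ (List.mem_range.mpr hi), ih]
    refine congrArg _ (funext fun k => ?_)
    by_cases hk : k = i <;> simp [hk]

-- the three filter passes of B fuse into one filter by the conjunction of the axis predicates
theorem pvFilters_fuse (cubes : List (List (List Int))) (ps : List (Int × Int)) :
    (PySem.List.pyRange 0 3 1).foldl
        (fun ps k => ps.filter (fun p =>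
          pvAxisOv (PySem.List.pyGetD cubes p.1 []) (PySem.List.pyGetD cubes p.2 []) k)) ps
      = ps.filter (fun p =>
          pvAxisOv (PySem.List.pyGetD cubes p.1 []) (PySem.List.pyGetD cubes p.2 []) 0 &&
          pvAxisOv (PySem.List.pyGetD cubes p.1 []) (PySem.List.pyGetD cubes p.2 []) 1 &&
          pvAxisOv (PySem.List.pyGetD cubes p.1 []) (PySem.List.pyGetD cubes p.2 []) 2) := by
  have hr : PySem.List.pyRange 0 3 1 = [0, 1, 2] := by decide
  rw [hr]
  simp only [List.foldl_cons, List.foldl_nil, List.filter_filter]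
  exact List.filter_congr (fun p _ => by simp [Bool.and_comm, Bool.and_left_comm])

-- an 'if c then some (g j) else none' comprehension is a filter-then-map
theorem pvFilterMap_if {α β : Type} (l : List α) (c : α → Bool) (g : α → β) :
    l.filterMap (fun a => if c a = true then some (g a) else none)
      = (l.filter c).map g := by
  induction l with
  | nil => rfl
  | cons a l ih =>
    by_cases h : c a = true <;> simp [h, ih]

-- the fused filter predicate, at Nat indices, is exactly pvAdj
theorem pvPred_eq (cubes : List (List (List Int))) (i jN : Nat) :
    ((pvAxisOv (PySem.List.pyGetD cubes (i : Int) []) (PySem.List.pyGetD cubes (jN : Int) []) 0 &&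
      pvAxisOv (PySem.List.pyGetD cubes (i : Int) []) (PySem.List.pyGetD cubes (jN : Int) []) 1 &&
      pvAxisOv (PySem.List.pyGetD cubes (i : Int) []) (PySem.List.pyGetD cubes (jN : Int) []) 2) &&
     (decide (i ≠ jN) && decide (pvCi cubes i ≠ []) && decide (pvCi cubes jN ≠ [])))
    = pvAdj cubes i jN := by
  simp only [PySem.List.pyGetD_natCast]
  have hgi : cubes.getD (i : Nat) [] = pvCi cubes i := rfl
  have hgj : cubes.getD (jN : Nat) [] = pvCi cubes jN := rfl
  rw [hgi, hgj, Bool.eq_iff_iff]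
  simp [pvAdj, pvOvCube_ne_nil, and_assoc]
  tauto

-- B's filtered pair list, converted to Nat indices: per outer index i it is exactly
-- the pvAdj-filtered range paired with i
theorem pvPairs_eq (cubes : List (List (List Int))) :
    ((PySem.List.pyRange 0 (cubes.length : Int) 1).flatMap (fun i =>
        (PySem.List.pyRange 0 (cubes.length : Int) 1).filterMap (fun j =>
          if i ≠ j ∧ PySem.List.pyGetD cubes i [] ≠ [] ∧ PySem.List.pyGetD cubes j [] ≠ []
          then some (i, j) else none))).filter (fun p =>
        pvAxisOv (PySem.List.pyGetD cubes p.1 []) (PySem.List.pyGetD cubes p.2 []) 0 &&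
        pvAxisOv (PySem.List.pyGetD cubes p.1 []) (PySem.List.pyGetD cubes p.2 []) 1 &&
        pvAxisOv (PySem.List.pyGetD cubes p.1 []) (PySem.List.pyGetD cubes p.2 []) 2)
      = (List.range cubes.length).flatMap (fun i =>
          (pvRowTo cubes i cubes.length).map (fun j => ((i : Int), j))) := by
  rw [PySem.List.pyRange_zero_natCast, List.flatMap_map, List.filter_flatMap]
  refine List.flatMap_congr (fun i hi => ?_)
  -- inner list for a fixed i
  have h1 : ∀ (jN : Nat),
      (if (i : Int) ≠ (jN : Int) ∧ PySem.List.pyGetD cubes (i : Int) [] ≠ []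
          ∧ PySem.List.pyGetD cubes (jN : Int) [] ≠ []
        then some ((i : Int), (jN : Int)) else none)
      = (if (decide (i ≠ jN) && decide (pvCi cubes i ≠ []) && decide (pvCi cubes jN ≠ [])) = true
        then some ((i : Int), (jN : Int)) else none) := by
    intro jN
    have : ((i : Int) ≠ (jN : Int)) ↔ (i ≠ jN) := by exact_mod_cast Iff.rfl
    simp [PySem.List.pyGetD_natCast, pvCi, this, and_assoc]
  rw [List.filterMap_map]
  have h2 : (fun jN : Nat =>
      (if (i : Int) ≠ (jN : Int) ∧ PySem.List.pyGetD cubes (i : Int) [] ≠ []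
          ∧ PySem.List.pyGetD cubes (jN : Int) [] ≠ []
        then some ((i : Int), (jN : Int)) else none))
      = (fun jN : Nat =>
        (if (decide (i ≠ jN) && decide (pvCi cubes i ≠ []) && decide (pvCi cubes jN ≠ [])) = true
          then some ((i : Int), (jN : Int)) else none)) := funext h1
  simp only [Function.comp_def]
  rw [h2, pvFilterMap_if (List.range cubes.length)
    (fun jN => decide (i ≠ jN) && decide (pvCi cubes i ≠ []) && decide (pvCi cubes jN ≠ []))
    (fun jN => ((i : Int), (jN : Int))), List.filter_map, List.filter_filter]
  simp only [Function.comp_def, pvPred_eq]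
  simp only [pvRowTo, List.map_map]
  rfl

-- grouping B's pair list fills exactly the pvRowTo rows
theorem pvBGroup (cubes : List (List (List Int))) :
    ∀ (m : Nat), m ≤ cubes.length →
      ((List.range m).flatMap (fun i =>
          (pvRowTo cubes i cubes.length).map (fun j => ((i : Int), j)))).foldl
          (fun (d : PySem.Dict Int (List Int)) p => d.modify p.1 [] (· ++ [p.2]))
          (pvMkMap (List.range cubes.length) (fun _ => []))
        = pvMkMap (List.range cubes.length)
            (fun k => if k < m then pvRowTo cubes k cubes.length else []) := by
  intro m
  induction m with
  | zero =>
    intro _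
    simp only [List.range_zero, List.flatMap_nil, List.foldl_nil]
    exact congrArg _ (funext fun k => by simp)
  | succ m ih =>
    intro hm
    have hm' : m ≤ cubes.length := Nat.le_of_succ_le hm
    have hmlt : m < cubes.length := hm
    rw [List.range_succ, List.flatMap_append, List.foldl_append, ih hm']
    simp only [List.flatMap_cons, List.flatMap_nil, List.append_nil]
    rw [pvFoldRow cubes m hmlt (pvRowTo cubes m cubes.length) _]
    refine congrArg _ (funext fun k => ?_)
    by_cases hk : k = m
    · simp [hk, pvRowTo]
    · have : (k < m + 1) ↔ (k < m) := by omega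
      simp [hk, this]

theorem pvB_eq (cubes : List (List (List Int))) : findIntersects_alt cubes = pvSpecOut cubes := by
  simp only [findIntersects_alt]
  rw [pvFilters_fuse, pvPairs_eq, pvAInit, pvBGroup cubes cubes.length le_rfl]
  simp only [pvMkMap, pvSpecOut]
  refine List.map_congr_left (fun k hk => ?_)
  simp [List.mem_range.mp hk]

-- ===== VERDICT (by name: the statement is the Claim_ definition above) =====
theorem findIntersects_spec : Claim_equal_findIntersects := by
  intro cubes _ _
  unfold Spec_findIntersects
  rw [pvA_eq, pvB_eq]
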